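-- pv_equiv track=rewrite | github.com/civatasomon/maze-generator | performance_enhanced_maze.py | possibilites
-- ===== SOURCE A (Python) =====
-- def possibilites(maze_code):
--     possibilites = 1
--     for i in maze_code:
--         if i == "S":
--             possibilites *= 4
--         elif i == "1":
--             possibilites *= 2
--         elif i == "2":
--             possibilites *= 3
--         else:
--             possibilites *= 1
--     return possibilites
-- ===== SOURCE B (Python) =====
-- def possibilites(maze_code):
--     return 4 ** maze_code.count("S") * 2 ** maze_code.count("1") * 3 ** maze_code.count("2")
-- ===== Notes on version B (the rewrite author's own statement) =====
-- stated objective: faster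
-- what changed: Replaces the per-character multiply loop with three counts and fast exponentiation (pow), avoiding O(n) bignum multiplications.
import Mathlib
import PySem

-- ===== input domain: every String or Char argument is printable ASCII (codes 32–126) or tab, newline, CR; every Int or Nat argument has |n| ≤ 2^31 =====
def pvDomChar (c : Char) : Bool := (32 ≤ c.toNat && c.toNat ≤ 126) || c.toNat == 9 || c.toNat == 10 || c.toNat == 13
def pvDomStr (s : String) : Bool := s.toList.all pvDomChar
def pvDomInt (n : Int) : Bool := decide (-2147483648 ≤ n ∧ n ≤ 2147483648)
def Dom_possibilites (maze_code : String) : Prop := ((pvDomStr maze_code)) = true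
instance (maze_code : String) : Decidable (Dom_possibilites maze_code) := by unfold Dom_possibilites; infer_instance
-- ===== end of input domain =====

-- B replaces A's per-character multiply loop by three character counts and fast exponentiation (objective: faster).

-- ===== PORT A =====
-- literal port of A: fold over the characters, multiplying an accumulator
def possibilites (maze_code : String) : Int :=
  maze_code.toList.foldl
    (fun p i =>
      if i == 'S' then p * 4
      else if i == '1' then p * 2
      else if i == '2' then p * 3
      else p * 1)
    1

-- ===== PORT B =====
-- literal port of B: three str.count calls (PySem.Str.count) and exponentiation
def possibilites_alt (maze_code : String) : Int :=
  4 ^ (PySem.Str.count maze_code "S") * 2 ^ (PySem.Str.count maze_code "1")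
    * 3 ^ (PySem.Str.count maze_code "2")

-- ===== PRECONDITION & SPEC =====
def Spec_possibilites (maze_code : String) (out : Int) : Prop := out = possibilites_alt maze_code
instance (maze_code : String) (out : Int) : Decidable (Spec_possibilites maze_code out) := by unfold Spec_possibilites; infer_instance

-- ===== CLAIM (what is proved, stated in full; the proofs are below) =====
def Claim_equal_possibilites : Prop := ∀ (maze_code : String), Dom_possibilites maze_code → Spec_possibilites maze_code (possibilites maze_code)

-- ===== LEMMAS AND PROOFS =====

-- Python str.count with a single-character needle is List.count of that character
theorem count_go_single (c : Char) (fuel : Nat) (l : List Char) (acc : Nat)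
    (h : l.length ≤ fuel) :
    PySem.Chars.count.go [c] fuel l acc = acc + l.count c := by
  induction fuel generalizing l acc with
  | zero =>
    interval_cases hl : l.length
    · simp [List.length_eq_zero_iff.mp hl, PySem.Chars.count.go]
  | succ n ih =>
    cases l with
    | nil => simp [PySem.Chars.count.go]
    | cons x t =>
      simp only [PySem.Chars.count.go]
      by_cases hx : x = c
      · subst hx
        rw [if_pos (by simp [List.isPrefixOf])]
        simp only [List.length, List.drop_succ_cons, List.drop_zero] at *
        rw [ih t (acc + 1) (by omega)]
        simp
        omega
      · rw [if_neg (by simp [List.isPrefixOf]; exact fun h' => hx h'.symm)]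
        rw [ih t acc (by simpa using Nat.le_of_succ_le_succ (by simpa using h))]
        simp [hx]

theorem chars_count_single (l : List Char) (c : Char) :
    PySem.Chars.count l [c] = l.count c := by
  unfold PySem.Chars.count
  rw [if_neg (by simp)]
  simpa using count_go_single c l.length l 0 le_rfl

theorem fold_eq_counts (l : List Char) (p : Int) :
    l.foldl
      (fun p i =>
        if i == 'S' then p * 4
        else if i == '1' then p * 2
        else if i == '2' then p * 3
        else p * 1)
      p
    = p * 4 ^ (l.count 'S') * 2 ^ (l.count '1') * 3 ^ (l.count '2') := by
  induction l generalizing p with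
  | nil => simp
  | cons x t ih =>
    simp only [List.foldl_cons, List.count_cons]
    by_cases h1 : x = 'S'
    · subst h1; rw [ih]; simp [pow_succ]; ring
    · by_cases h2 : x = '1'
      · subst h2; rw [if_neg (by simp)] ; simp only [beq_self_eq_true, if_pos]
        rw [ih]; simp [pow_succ]; ring
      · by_cases h3 : x = '2'
        · subst h3
          rw [if_neg (by simp), if_neg (by simp)]
          simp only [beq_self_eq_true, if_pos]
          rw [ih]; simp [pow_succ]; ring
        · rw [if_neg (by simp [h1]), if_neg (by simp [h2]), if_neg (by simp [h3])]
          rw [ih]; simp [h1, h2, h3, mul_one]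

-- ===== VERDICT (by name: the statement is the Claim_ definition above) =====
theorem possibilites_spec : Claim_equal_possibilites := by
  intro s _
  unfold Spec_possibilites possibilites possibilites_alt
  rw [fold_eq_counts]
  rw [PySem.Str.count_eq, PySem.Str.count_eq, PySem.Str.count_eq]
  have hS : ("S" : String).toList = ['S'] := by decide
  have h1 : ("1" : String).toList = ['1'] := by decide
  have h2 : ("2" : String).toList = ['2'] := by decide
  rw [hS, h1, h2, chars_count_single, chars_count_single, chars_count_single]
  ring
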